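-- pv_equiv track=rewrite | github.com/Yudiaramos/Redes-T2 | main.py | decode_to_string
-- ===== SOURCE A (Python) =====
-- import math
--
-- def decode_to_string(quadro):
--     i = 0
--     j = 0
--     mensagem = ""
--
--     while i < len(quadro):
--         letra = 0
--         for j in range(i, i + 8):
--             if j < len(quadro):
--                 letra += quadro[j] * int(math.pow(2, 7 - (j - i)))
--
--         mensagem += chr(letra)
--         i += 8
--
--     return mensagem
-- ===== SOURCE B (Python) =====
-- def decode_to_string(quadro):
--     bits = quadro + [0] * (-len(quadro) % 8)
--     nch = len(bits) // 8
--     vals = [0] * nch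
--     for k in range(8):
--         w = 1 << (7 - k)
--         vals = [vals[m] + bits[8 * m + k] * w for m in range(nch)]
--     return ''.join(map(chr, vals))
-- ===== Notes on version B (the rewrite author's own statement) =====
-- stated objective: alternative
-- what changed: B decodes by bit-significance transposition: it zero-pads the array to a multiple of 8, then makes 8 staged passes, one per bit position k, each pass adding column k's weighted bits (bits[8*m+k] << (7-k)) into a per-character value array, finally mapping chr over the array - instead of A's single character-major loop that finishes each chr from its 8-bit group before moving on.
-- outside the precondition, e.g. on decode_to_string([16384]): A raises ValueError, B raises ValueError
import Mathlib
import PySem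

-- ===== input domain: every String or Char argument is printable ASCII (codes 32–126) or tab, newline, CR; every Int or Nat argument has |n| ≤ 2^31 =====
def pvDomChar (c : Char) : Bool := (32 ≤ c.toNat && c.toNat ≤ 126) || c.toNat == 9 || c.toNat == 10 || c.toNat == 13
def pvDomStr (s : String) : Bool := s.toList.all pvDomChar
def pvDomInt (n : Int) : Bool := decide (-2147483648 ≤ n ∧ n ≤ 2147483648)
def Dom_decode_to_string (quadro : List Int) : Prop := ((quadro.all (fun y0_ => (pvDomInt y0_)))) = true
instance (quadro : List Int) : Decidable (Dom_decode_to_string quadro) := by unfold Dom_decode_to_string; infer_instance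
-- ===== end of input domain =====

-- B decodes by bit-significance transposition (8 staged passes, one per bit position,
-- accumulating into a per-character value array) instead of A's character-major loop
-- that completes each 8-bit group before emitting its chr (objective: alternative).


-- chr(n): exact for n a valid Unicode scalar value (guaranteed by Pre_ below)
def pyChr (n : Int) : Char := Char.ofNat n.toNat

-- ===== PORT A =====
-- the 'while i < len(quadro)' loop; mensagem is kept as List Char;
-- int(math.pow(2, 7-(j-i))) is exact for exponents 0..7 and ported as 2^(7-(j-i))
def decode_to_string_loop (quadro : List Int) (i : Int) (mensagem : List Char) : List Char :=
  if _h : i < (quadro.length : Int) then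
    let letra := (PySem.List.pyRange i (i + 8) 1).foldl
      (fun letra j => if j < (quadro.length : Int) then
          letra + PySem.List.pyGetD quadro j 0 * 2 ^ ((7 - (j - i)).toNat)
        else letra) 0
    decode_to_string_loop quadro (i + 8) (mensagem ++ [pyChr letra])
  else mensagem
termination_by ((quadro.length : Int) - i).toNat
decreasing_by omega

def decode_to_string (quadro : List Int) : String :=
  String.ofList (decode_to_string_loop quadro 0 [])

-- ===== PORT B =====
-- bits = quadro + [0]*(-len(quadro)%8); nch = len(bits)//8; vals = [0]*nch;
-- for k in range(8): w = 1 << (7-k); vals = [vals[m] + bits[8*m+k]*w for m in range(nch)];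
-- return ''.join(map(chr, vals))
def decode_to_string_alt (quadro : List Int) : String :=
  let bits := quadro ++ List.replicate (PySem.Int.mod (-(quadro.length : Int)) 8).toNat 0
  let nch := PySem.Int.floordiv (bits.length : Int) 8
  let vals := (PySem.List.pyRange 0 8 1).foldl
    (fun vals k =>
      let w : Int := 2 ^ ((7 : Int) - k).toNat
      (PySem.List.pyRange 0 nch 1).map
        (fun m => PySem.List.pyGetD vals m 0 + PySem.List.pyGetD bits (8 * m + k) 0 * w))
    (List.replicate nch.toNat 0)
  String.ofList (vals.map pyChr)

-- ===== PRECONDITION & SPEC =====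
-- the weighted value of the 8-bit group starting at position 8*m (missing trailing bits count as 0)
def pvChunkVal (quadro : List Int) (m : Nat) : Int :=
  ∑ k ∈ Finset.range 8, quadro.getD (8 * m + k) 0 * 2 ^ (7 - k)

-- Pre_ excludes exactly the inputs on which Python's chr raises ValueError (a group value
-- negative or ≥ 0x110000, so A returns nothing) or yields a lone surrogate (0xD800–0xDFFF),
-- which Lean's Char/String cannot represent; on every genuine bit array Pre_ holds.
def Pre_decode_to_string (quadro : List Int) : Prop :=
  ∀ m < (quadro.length + 7) / 8,
    0 ≤ pvChunkVal quadro m ∧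
      (pvChunkVal quadro m < 55296 ∨
        (57344 ≤ pvChunkVal quadro m ∧ pvChunkVal quadro m < 1114112))
instance (quadro : List Int) : Decidable (Pre_decode_to_string quadro) := by
  unfold Pre_decode_to_string; infer_instance

def pvWitness_decode_to_string : List Int := [0, 1, 0, 0, 0, 0, 0, 1, 0, 1, 1]

def Spec_decode_to_string (quadro : List Int) (out : String) : Prop := out = decode_to_string_alt quadro
instance (quadro : List Int) (out : String) : Decidable (Spec_decode_to_string quadro out) := by unfold Spec_decode_to_string; infer_instance

-- ===== CLAIM (what is proved, stated in full; the proofs are below) =====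
def Claim_equal_decode_to_string : Prop := ∀ (quadro : List Int), Dom_decode_to_string quadro → Pre_decode_to_string quadro → Spec_decode_to_string quadro (decode_to_string quadro)

-- ===== LEMMAS AND PROOFS =====

-- number of characters produced
def pvNch (q : List Int) : Nat := (q.length + 7) / 8

-- the common normal form both ports are reduced to
def pvCanon (q : List Int) : List Char :=
  (List.range (pvNch q)).map (fun m => pyChr (pvChunkVal q m))

-- ---- shared arithmetic on the padding ----

lemma pad_spec (q : List Int) :
    (PySem.Int.mod (-(q.length : Int)) 8).toNat = 8 * pvNch q - q.length := by
  rw [PySem.Int.mod_eq_emod_of_pos (by norm_num : (0:Int) < 8)]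
  unfold pvNch
  omega

lemma bits_getD (q : List Int) (p i : Nat) :
    (q ++ List.replicate p 0).getD i 0 = q.getD i 0 := by
  rcases lt_or_ge i q.length with h | h
  · rw [List.getD_eq_getElem?_getD, List.getD_eq_getElem?_getD,
        List.getElem?_append_left h]
  · rw [List.getD_eq_default _ _ h]
    rcases lt_or_ge i (q.length + p) with h2 | h2
    · have : (q ++ List.replicate p 0).getD i 0 = (List.replicate p 0).getD (i - q.length) 0 := by
        rw [List.getD_eq_getElem?_getD, List.getD_eq_getElem?_getD,
            List.getElem?_append_right h]
      rw [this]
      exact List.getD_replicate 0 (by omega)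
    · apply List.getD_eq_default
      simp [List.length_replicate]
      omega

-- chunk values of the padded array agree with those of q
lemma chunkVal_bits (q : List Int) (p m : Nat) :
    pvChunkVal (q ++ List.replicate p 0) m = pvChunkVal q m := by
  unfold pvChunkVal
  exact Finset.sum_congr rfl (fun k _ => by rw [bits_getD])

-- ---- A side ----

-- A's inner loop over range(i, i+c) as a guarded sum
lemma foldsum (q : List Int) (i : Int) (c : Nat) (hc : c ≤ 8) (acc : Int) :
    ((PySem.List.pyRange i (i + (c : Int)) 1).foldl
      (fun letra j => if j < (q.length : Int) then
          letra + PySem.List.pyGetD q j 0 * 2 ^ ((7 - (j - i)).toNat)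
        else letra) acc)
      = acc + ∑ k ∈ Finset.range c,
          (if i + (k : Int) < (q.length : Int) then
            PySem.List.pyGetD q (i + (k : Int)) 0 * 2 ^ (7 - k) else 0) := by
  induction c generalizing acc with
  | zero =>
      rw [show i + ((0:Nat) : Int) = i by norm_num,
          PySem.List.pyRange_one_eq_nil le_rfl]
      simp
  | succ c ih =>
      rw [show i + ((c+1 : Nat) : Int) = (i + (c : Int)) + 1 by push_cast; ring,
          PySem.List.pyRange_one_succ_right (by omega), List.foldl_append,
          ih (by omega) acc, Finset.sum_range_succ]
      simp only [List.foldl_cons, List.foldl_nil]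
      have hexp : ((7 : Int) - (i + (c : Int) - i)).toNat = 7 - c := by omega
      rw [hexp]
      split_ifs <;> ring

-- one guarded term, at start index 8*m, equals the getD term of pvChunkVal
lemma term_eq (q : List Int) (m k : Nat) (w : Int) :
    (if ((8 * m : Nat) : Int) + (k : Int) < (q.length : Int) then
        PySem.List.pyGetD q (((8 * m : Nat) : Int) + (k : Int)) 0 * w else 0)
      = q.getD (8 * m + k) 0 * w := by
  have hcast : ((8 * m : Nat) : Int) + (k : Int) = ((8 * m + k : Nat) : Int) := by push_cast; ring
  by_cases h : 8 * m + k < q.length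
  · rw [if_pos (by omega), hcast, PySem.List.pyGetD_natCast]
  · rw [if_neg (by omega), List.getD_eq_default _ _ (by omega)]
    ring

-- A's letra for the group starting at 8*m is pvChunkVal q m
lemma letra_eq (q : List Int) (m : Nat) :
    ((PySem.List.pyRange ((8 * m : Nat) : Int) (((8 * m : Nat) : Int) + 8) 1).foldl
      (fun letra j => if j < (q.length : Int) then
          letra + PySem.List.pyGetD q j 0 * 2 ^ ((7 - (j - ((8 * m : Nat) : Int))).toNat)
        else letra) 0)
      = pvChunkVal q m := by
  have h8 : ((8 * m : Nat) : Int) + 8 = ((8 * m : Nat) : Int) + ((8:Nat) : Int) := by norm_num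
  rw [h8, foldsum q _ 8 le_rfl 0]
  unfold pvChunkVal
  rw [Finset.sum_congr rfl (fun k _ => term_eq q m k (2 ^ (7 - k)))]
  ring

-- A's loop from 8*m produces the tail of pvCanon
lemma A_loop_eq (q : List Int) (m : Nat) (acc : List Char) :
    decode_to_string_loop q ((8 * m : Nat) : Int) acc
      = acc ++ (List.range (pvNch q - m)).map (fun t => pyChr (pvChunkVal q (m + t))) := by
  by_cases h : ((8 * m : Nat) : Int) < (q.length : Int)
  · rw [decode_to_string_loop, dif_pos h]
    have hstep : ((8 * m : Nat) : Int) + 8 = ((8 * (m + 1) : Nat) : Int) := by push_cast; ring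
    rw [letra_eq q m, hstep, A_loop_eq q (m + 1)]
    have hm : m < pvNch q := by unfold pvNch; omega
    have hr : pvNch q - m = (pvNch q - (m + 1)) + 1 := by omega
    rw [hr, List.range_succ_eq_map, List.map_cons, List.map_map]
    simp only [Nat.add_zero, List.append_assoc, List.singleton_append]
    congr 1
    congr 1
    apply List.map_congr_left
    intro t _
    simp only [Function.comp_apply]
    rw [show m + Nat.succ t = m + 1 + t from by omega]
  · rw [decode_to_string_loop, dif_neg h]
    have : pvNch q - m = 0 := by unfold pvNch; omega
    rw [this]
    simp
termination_by pvNch q - m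
decreasing_by unfold pvNch; omega

lemma A_eq_canon (q : List Int) : decode_to_string q = String.ofList (pvCanon q) := by
  unfold decode_to_string pvCanon
  have h0 : (0 : Int) = ((8 * 0 : Nat) : Int) := by norm_num
  rw [h0, A_loop_eq q 0 []]
  simp

-- ---- B side ----

-- partial column sums
def pvPartial (bits : List Int) (K m : Nat) : Int :=
  ∑ k ∈ Finset.range K, bits.getD (8 * m + k) 0 * 2 ^ (7 - k)

-- B's k-fold, unrolled over range(0, K): the value array after K passes
lemma B_fold_eq (bits : List Int) (N : Nat) (K : Nat) (hK : K ≤ 8) :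
    ((PySem.List.pyRange 0 ((K : Nat) : Int) 1).foldl
      (fun vals k =>
        (PySem.List.pyRange 0 ((N : Nat) : Int) 1).map
          (fun m => PySem.List.pyGetD vals m 0 +
            PySem.List.pyGetD bits (8 * m + k) 0 * 2 ^ ((7 : Int) - k).toNat))
      (List.replicate N 0))
      = (List.range N).map (fun m => pvPartial bits K m) := by
  induction K with
  | zero =>
      rw [show ((0:Nat) : Int) = 0 by norm_num, PySem.List.pyRange_one_eq_nil le_rfl]
      simp only [List.foldl_nil, pvPartial, Finset.range_zero, Finset.sum_empty]
      rw [List.map_const', List.length_range]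
  | succ K ih =>
      rw [show ((K+1 : Nat) : Int) = ((K : Nat) : Int) + 1 by push_cast; ring,
          PySem.List.pyRange_one_succ_right (by positivity),
          List.foldl_append, ih (by omega)]
      simp only [List.foldl_cons, List.foldl_nil]
      rw [PySem.List.pyRange_zero_natCast N, List.map_map]
      apply List.map_congr_left
      intro m hm
      have hmN : m < N := List.mem_range.mp hm
      simp only [Function.comp_apply]
      rw [PySem.List.pyGetD_natCast, PySem.List.getD_map_range _ _ _ _ hmN,
          show (8 : Int) * ((m : Nat) : Int) + ((K : Nat) : Int) = ((8 * m + K : Nat) : Int)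
            from by push_cast; ring,
          PySem.List.pyGetD_natCast,
          show (((7 : Int) - ((K : Nat) : Int)).toNat) = 7 - K from by omega]
      unfold pvPartial
      rw [Finset.sum_range_succ]

lemma B_eq_canon (q : List Int) : decode_to_string_alt q = String.ofList (pvCanon q) := by
  have hL : q.length ≤ 8 * pvNch q := by unfold pvNch; omega
  dsimp only [decode_to_string_alt]
  rw [pad_spec q]
  have hlen : (q ++ List.replicate (8 * pvNch q - q.length) 0).length = 8 * pvNch q := by
    simp only [List.length_append, List.length_replicate]
    omega
  rw [hlen]
  have hnch : PySem.Int.floordiv ((8 * pvNch q : Nat) : Int) 8 = ((pvNch q : Nat) : Int) := by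
    rw [show (8 : Int) = ((8 : Nat) : Int) from by norm_num, PySem.Int.floordiv_natCast]
    norm_num
  rw [hnch, Int.toNat_natCast]
  have hfold := B_fold_eq (q ++ List.replicate (8 * pvNch q - q.length) 0) (pvNch q) 8 le_rfl
  rw [show (((8 : Nat)) : Int) = (8 : Int) from by norm_num] at hfold
  rw [hfold, List.map_map]
  unfold pvCanon
  congr 1
  apply List.map_congr_left
  intro m _
  simp only [Function.comp_apply]
  congr 1
  exact chunkVal_bits q _ m

-- ===== VERDICT (by name: the statement is the Claim_ definition above) =====
theorem decode_to_string_spec : Claim_equal_decode_to_string := by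
  intro quadro _ _
  unfold Spec_decode_to_string
  rw [A_eq_canon, B_eq_canon]
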